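-- pv_equiv track=rewrite | github.com/luquelab/pyCapsid | src/pyCapsid/VIS.py | cluster_scheme
-- ===== SOURCE A (Python) =====
-- def cluster_scheme(mol, hexcolor, clusters):
--   r0 = mol[0]['resid']
--   c0 = hexcolor[0]
--   clust_scheme = []
--   select = '@'
--   i = 1
--   j = 0
--   for at in mol:
--       r = at['resid']
--       if r == r0:
--           select += str(i) + ','
--           i += 1
--       else:
--           clust_scheme.append([c0, select[:-1]])
--           select = '@' + str(i) + ','
--           r0 = r
--           j +=1
--           i +=1
--           c0 = hexcolor[j]
--           l0 = clusters[j]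
--   clust_scheme.append([c0, select[:-1]])
--
--   return clust_scheme
-- ===== SOURCE B (Python) =====
-- def cluster_scheme(mol, hexcolor, clusters):
--     scheme = []
--     n = len(mol)
--     start = 0
--     j = 0
--     while start < n:
--         end = start
--         while end < n and mol[end]['resid'] == mol[start]['resid']:
--             end += 1
--         scheme.append([hexcolor[j], '@' + ','.join(str(k) for k in range(start + 1, end + 1))])
--         j += 1
--         start = end
--     return scheme
-- ===== Notes on version B (the rewrite author's own statement) =====
-- stated objective: alternative
-- what changed: Replaces A's single-pass r0/select/i/j state machine (string grown with trailing commas then trimmed with select[:-1]) by a run-finding two-level loop: an inner scan locates the end of each contiguous residue run and the entry is built directly with ','.join over the run's 1-based index range; B never reads clusters.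
import Mathlib
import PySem

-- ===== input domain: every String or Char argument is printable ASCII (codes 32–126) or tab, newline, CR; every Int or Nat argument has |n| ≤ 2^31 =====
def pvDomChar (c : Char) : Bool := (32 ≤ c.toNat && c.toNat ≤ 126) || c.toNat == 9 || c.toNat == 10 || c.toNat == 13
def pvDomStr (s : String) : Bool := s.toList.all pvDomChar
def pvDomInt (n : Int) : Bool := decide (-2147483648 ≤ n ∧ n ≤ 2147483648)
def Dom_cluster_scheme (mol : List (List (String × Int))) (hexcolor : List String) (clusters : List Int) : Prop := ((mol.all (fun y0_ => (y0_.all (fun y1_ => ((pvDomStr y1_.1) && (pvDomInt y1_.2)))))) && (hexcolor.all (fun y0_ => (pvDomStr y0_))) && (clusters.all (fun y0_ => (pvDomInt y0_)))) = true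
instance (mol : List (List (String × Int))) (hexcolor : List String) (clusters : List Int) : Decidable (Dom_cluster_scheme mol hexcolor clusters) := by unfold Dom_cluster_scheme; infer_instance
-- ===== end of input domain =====

-- B re-implements the scheme builder as a run-finding two-level loop (join over an index
-- range per residue run) instead of A's single-pass r0/select/i/j state machine; objective:
-- alternative decomposition, same cost; B never reads `clusters` (A reads clusters[j] but
-- discards the value, so A raises IndexError on short `clusters` where B returns).

-- shared helper: at['resid'] as a total function (Pre_ guarantees the key is present)
def pvResid (a : List (String × Int)) : Int := ((PySem.Dict.mk a).get? "resid").getD 0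

-- ===== PORT A =====
-- the for-loop of A, with the trailing `clust_scheme.append` folded into the base case
def pvLoopA (hexcolor : List String) (clusters : List Int) :
    List (List (String × Int)) → Int → String → String → Int → Int → List (List String) → List (List String)
  | [], _r0, c0, select, _i, _j, acc => acc ++ [[c0, PySem.Str.slice select none (some (-1))]]
  | at_ :: rest, r0, c0, select, i, j, acc =>
    if pvResid at_ = r0 then
      pvLoopA hexcolor clusters rest r0 c0 (select ++ PySem.Int.toStr i ++ ",") (i+1) j acc
    else
      -- l0 = clusters[j]: the value is read and never used (IndexError outside Pre_)
      let _l0 : Int := (PySem.List.pyGet? clusters (j+1)).getD 0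
      pvLoopA hexcolor clusters rest (pvResid at_)
        ((PySem.List.pyGet? hexcolor (j+1)).getD "")
        ("@" ++ PySem.Int.toStr i ++ ",") (i+1) (j+1)
        (acc ++ [[c0, PySem.Str.slice select none (some (-1))]])

def cluster_scheme (mol : List (List (String × Int))) (hexcolor : List String) (clusters : List Int) : List (List String) :=
  pvLoopA hexcolor clusters mol (pvResid (mol.headD []))
    ((PySem.List.pyGet? hexcolor 0).getD "") "@" 1 0 []

-- ===== PORT B =====
-- inner while loop: advance `e` while mol[e]['resid'] == mol[start]['resid']
-- (the fuel argument is only a structural totality guard; n - e is an upper bound on the steps)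
def pvRunEnd (mol : List (List (String × Int))) (n : Nat) (s : Nat) : Nat → Nat → Nat
  | 0, e => e
  | fuel+1, e =>
    if e < n ∧ pvResid ((PySem.List.pyGet? mol (e : Int)).getD []) = pvResid ((PySem.List.pyGet? mol (s : Int)).getD []) then
      pvRunEnd mol n s fuel (e+1)
    else e

-- outer while loop of B (fuel n+1-s bounds the iterations: s strictly grows each round)
def pvOuterB (mol : List (List (String × Int))) (hexcolor : List String) (n : Nat) :
    Nat → Nat → Nat → List (List String) → List (List String)
  | 0, _, _, acc => acc
  | fuel+1, s, j, acc =>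
    if s < n then
      let e := pvRunEnd mol n s (n - s) s
      pvOuterB mol hexcolor n fuel e (j+1)
        (acc ++ [[(PySem.List.pyGet? hexcolor (j : Int)).getD "",
                  "@" ++ PySem.Str.join "," ((PySem.List.pyRange ((s : Int)+1) ((e : Int)+1) 1).map PySem.Int.toStr)]])
    else acc

def cluster_scheme_alt (mol : List (List (String × Int))) (hexcolor : List String) (clusters : List Int) : List (List String) :=
  pvOuterB mol hexcolor mol.length (mol.length+1) 0 0 []

-- ===== PRECONDITION & SPEC =====
-- number of contiguous residue runs, read off the adjacent-pair boundaries
def pvRunCount (mol : List (List (String × Int))) : Nat :=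
  if mol.isEmpty then 0
  else 1 + (((mol.map pvResid).zip (mol.map pvResid).tail).countP (fun p => decide (p.1 ≠ p.2)))

-- Pre_ excludes exactly the inputs where the Python A raises: empty mol (mol[0] → IndexError),
-- an atom without a 'resid' key (KeyError), fewer colors than runs (hexcolor[j] → IndexError),
-- and — with more than one run — clusters shorter than the run count (the unused read
-- clusters[j] → IndexError).
def Pre_cluster_scheme (mol : List (List (String × Int))) (hexcolor : List String) (clusters : List Int) : Prop :=
  mol ≠ [] ∧ (∀ a ∈ mol, ((PySem.Dict.mk a).get? "resid").isSome = true) ∧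
  pvRunCount mol ≤ hexcolor.length ∧ (1 < pvRunCount mol → pvRunCount mol ≤ clusters.length)

instance (mol : List (List (String × Int))) (hexcolor : List String) (clusters : List Int) : Decidable (Pre_cluster_scheme mol hexcolor clusters) := by
  unfold Pre_cluster_scheme; infer_instance

def pvWitness_cluster_scheme : (List (List (String × Int))) × List String × List Int :=
  ([[("resid", 1)], [("resid", 1)], [("resid", 2)]], ["#ff0000", "#00ff00"], [0, 1])

def Spec_cluster_scheme (mol : List (List (String × Int))) (hexcolor : List String) (clusters : List Int) (out : List (List String)) : Prop := out = cluster_scheme_alt mol hexcolor clusters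
instance (mol : List (List (String × Int))) (hexcolor : List String) (clusters : List Int) (out : List (List String)) : Decidable (Spec_cluster_scheme mol hexcolor clusters out) := by unfold Spec_cluster_scheme; infer_instance

-- ===== CLAIM (what is proved, stated in full; the proofs are below) =====
def Claim_equal_cluster_scheme : Prop := ∀ (mol : List (List (String × Int))) (hexcolor : List String) (clusters : List Int), Dom_cluster_scheme mol hexcolor clusters → Pre_cluster_scheme mol hexcolor clusters → Spec_cluster_scheme mol hexcolor clusters (cluster_scheme mol hexcolor clusters)


-- ===== LEMMAS AND PROOFS =====

-- the select string accumulated over a run of k atoms starting at 1-based index i: "i,i+1,…,"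
def pvCsvS (i : Int) : Nat → String
  | 0 => ""
  | k+1 => PySem.Int.toStr i ++ "," ++ pvCsvS (i+1) k

-- common description of the output: one entry per residue run
def pvSpec (hexcolor : List String) : List (List (String × Int)) → Int → Nat → List (List String)
  | [], _, _ => []
  | a :: tl, i, j =>
    [(PySem.List.pyGet? hexcolor (j : Int)).getD "",
     "@" ++ PySem.Str.join "," ((PySem.List.pyRange i (i + 1 + ((tl.takeWhile (fun b => pvResid b == pvResid a)).length : Int)) 1).map PySem.Int.toStr)]
    :: pvSpec hexcolor (tl.dropWhile (fun b => pvResid b == pvResid a)) (i + 1 + ((tl.takeWhile (fun b => pvResid b == pvResid a)).length : Int)) (j+1)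
termination_by l => l.length
decreasing_by
  have := List.length_dropWhile_le (fun b => pvResid b == pvResid a) tl
  simp; omega

theorem pvCsv_chars : ∀ (k : Nat) (i : Int),
    (pvCsvS i (k+1)).toList =
      PySem.Chars.join [','] (((PySem.List.pyRange i (i + 1 + (k : Int)) 1).map PySem.Int.toStr).map String.toList) ++ [','] := by
  intro k
  induction k with
  | zero =>
    intro i
    rw [show (i + 1 + ((0:Nat):Int)) = i + 1 by push_cast; ring, PySem.List.pyRange_one_singleton]
    simp [pvCsvS, PySem.Chars.join_singleton, PySem.Int.toList_toStr]
  | succ k ih =>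
    intro i
    have h := ih (i+1)
    have hL : (pvCsvS i (k+1+1)).toList = PySem.Int.toChars i ++ [','] ++ (pvCsvS (i+1) (k+1)).toList := by
      show (PySem.Int.toStr i ++ "," ++ pvCsvS (i+1) (k+1)).toList = _
      simp [PySem.Int.toList_toStr]
    rw [show (i + 1 + ((k+1:Nat):Int)) = (i+1) + 1 + (k:Int) by push_cast; ring]
    rw [PySem.List.pyRange_one_cons (by omega : i < (i+1) + 1 + (k:Int))]
    rw [PySem.List.pyRange_one_cons (by omega : i + 1 < (i+1) + 1 + (k:Int))]
    simp only [List.map_cons]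
    rw [PySem.Chars.join_cons_cons, hL, h]
    rw [PySem.List.pyRange_one_cons (by omega : i + 1 < (i+1) + 1 + (k:Int))]
    simp [PySem.Int.toList_toStr, List.append_assoc]

theorem pvCsv_join (k : Nat) (i : Int) (pre : String) :
    PySem.Str.slice (pre ++ pvCsvS i (k+1)) none (some (-1)) =
      pre ++ PySem.Str.join "," ((PySem.List.pyRange i (i + 1 + (k : Int)) 1).map PySem.Int.toStr) := by
  apply String.toList_inj.mp
  rw [PySem.Str.toList_slice]
  simp only [PySem.Chars.slice_eq_listSlice, PySem.List.slice_to_neg_one, String.toList_append,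
    PySem.Str.toList_join, pvCsv_chars k i]
  rw [show ("," : String).toList = [','] by rfl]
  rw [← List.append_assoc, List.dropLast_concat]

theorem pvLoopA_eq (hexcolor : List String) (clusters : List Int) (mol : List (List (String × Int))) :
    ∀ (r0 : Int) (c0 sel : String) (i : Int) (j : Nat) (acc : List (List String)),
    pvLoopA hexcolor clusters mol r0 c0 sel i (j : Int) acc =
      acc ++ [[c0, PySem.Str.slice (sel ++ pvCsvS i (mol.takeWhile (fun b => pvResid b == r0)).length) none (some (-1))]]
        ++ pvSpec hexcolor (mol.dropWhile (fun b => pvResid b == r0))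
             (i + ((mol.takeWhile (fun b => pvResid b == r0)).length : Int)) (j+1) := by
  induction mol with
  | nil => intro r0 c0 sel i j acc; simp [pvLoopA, pvCsvS, pvSpec]
  | cons at_ rest ih =>
    intro r0 c0 sel i j acc
    by_cases hr : pvResid at_ = r0
    · rw [pvLoopA, if_pos hr,
        List.takeWhile_cons_of_pos (by simp [hr]), List.dropWhile_cons_of_pos (by simp [hr]),
        ih r0 c0 (sel ++ PySem.Int.toStr i ++ ",") (i+1) j acc]
      have h1 : ∀ n : Nat, sel ++ PySem.Int.toStr i ++ "," ++ pvCsvS (i+1) n = sel ++ pvCsvS i (n+1) := by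
        intro n; simp [pvCsvS, String.append_assoc]
      have h2 : ∀ n : Nat, (i+1) + (n:Int) = i + ((n+1:Nat):Int) := by intro n; push_cast; ring
      rw [h1, h2]
      simp
    · rw [pvLoopA, if_neg hr]
      rw [show ((j:Int)+1) = (((j+1:Nat)):Int) by push_cast; ring]
      rw [ih (pvResid at_) _ _ (i+1) (j+1) _]
      rw [List.takeWhile_cons_of_neg (by simp [hr]), List.dropWhile_cons_of_neg (by simp [hr])]
      have h1 : ∀ n : Nat, ("@" : String) ++ PySem.Int.toStr i ++ "," ++ pvCsvS (i+1) n = "@" ++ pvCsvS i (n+1) := by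
        intro n; simp [pvCsvS, String.append_assoc]
      rw [h1, pvCsv_join]
      rw [pvSpec]
      simp [pvCsvS, List.append_assoc]

-- (searched: not in Mathlib under this shape)
theorem pvDropWhile_drop {α : Type} (p : α → Bool) (l : List α) :
    l.dropWhile p = l.drop (l.takeWhile p).length := by
  induction l with
  | nil => simp
  | cons a t ih => by_cases h : p a <;> simp [h, ih]

theorem pvRunEnd_eq (mol : List (List (String × Int))) (s : Nat) :
    ∀ (fuel e : Nat), mol.length - e ≤ fuel → pvRunEnd mol mol.length s fuel e =
      e + ((mol.drop e).takeWhile (fun b => pvResid b == pvResid (mol[s]?.getD []))).length := by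
  intro fuel
  induction fuel with
  | zero =>
    intro e he
    rw [List.drop_eq_nil_of_le (by omega)]
    simp [pvRunEnd]
  | succ fuel ih =>
    intro e he
    by_cases hlt : e < mol.length
    · rw [List.drop_eq_getElem_cons hlt]
      by_cases hk : pvResid (mol[e]?.getD []) = pvResid (mol[s]?.getD [])
      · rw [pvRunEnd, if_pos ⟨hlt, by simp only [PySem.List.pyGet?_natCast]; exact hk⟩]
        rw [ih (e+1) (by omega), List.takeWhile_cons_of_pos
          (by rw [List.getElem?_eq_getElem hlt] at hk; simpa using hk)]
        simp; omega
      · rw [pvRunEnd, if_neg (by simp only [PySem.List.pyGet?_natCast]; exact fun hc => hk hc.2)]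
        rw [List.takeWhile_cons_of_neg
          (by rw [List.getElem?_eq_getElem hlt] at hk; simpa using hk)]
        simp
    · rw [pvRunEnd, if_neg (by omega), List.drop_eq_nil_of_le (by omega)]
      simp

theorem pvOuterB_eq (mol : List (List (String × Int))) (hexcolor : List String) :
    ∀ (fuel s j : Nat) (acc : List (List String)), mol.length - s < fuel →
    pvOuterB mol hexcolor mol.length fuel s j acc = acc ++ pvSpec hexcolor (mol.drop s) ((s : Int)+1) j := by
  intro fuel
  induction fuel with
  | zero => intro s j acc h; exact absurd h (by omega)
  | succ fuel ih =>
    intro s j acc h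
    by_cases hs : s < mol.length
    · rw [pvOuterB, if_pos hs]
      have hre := pvRunEnd_eq mol s (mol.length - s) s (by omega)
      have hK : pvResid (mol[s]?.getD []) = pvResid mol[s] := by
        simp [List.getElem?_eq_getElem hs]
      have hds : mol.drop s = mol[s] :: mol.drop (s+1) := List.drop_eq_getElem_cons hs
      rw [hds, List.takeWhile_cons_of_pos (by simp [hK]), hK] at hre
      set tw := ((mol.drop (s+1)).takeWhile (fun b => pvResid b == pvResid mol[s])).length with htw
      have he : pvRunEnd mol mol.length s (mol.length - s) s = s + (1 + tw) := by rw [hre]; simp [← htw]; omega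
      rw [he]
      rw [ih (s + (1 + tw)) (j+1) _ (by omega)]
      have hdw : mol.drop (s + (1 + tw)) = (mol.drop (s+1)).dropWhile (fun b => pvResid b == pvResid mol[s]) := by
        rw [pvDropWhile_drop, ← htw, List.drop_drop]
        congr 1; omega
      rw [hdw, hds, pvSpec]
      simp only [← htw]
      push_cast
      ring_nf
      simp [List.append_assoc]
    · rw [pvOuterB, if_neg hs, List.drop_eq_nil_of_le (by omega)]
      simp [pvSpec]

-- ===== VERDICT (by name: the statement is the Claim_ definition above) =====
theorem cluster_scheme_spec : Claim_equal_cluster_scheme := by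
  intro mol hexcolor clusters _ hpre
  unfold Spec_cluster_scheme
  obtain ⟨hne, -, -, -⟩ := hpre
  obtain ⟨a, tl, rfl⟩ : ∃ a tl, mol = a :: tl := by
    cases mol with
    | nil => exact absurd rfl hne
    | cons a tl => exact ⟨a, tl, rfl⟩
  unfold cluster_scheme cluster_scheme_alt
  have hA := pvLoopA_eq hexcolor clusters (a :: tl) (pvResid ((a :: tl).headD []))
      ((PySem.List.pyGet? hexcolor 0).getD "") "@" 1 0 []
  have hB := pvOuterB_eq (a :: tl) hexcolor ((a :: tl).length + 1) 0 0 [] (by omega)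
  simp only [Nat.cast_zero] at hA hB
  rw [hA, hB]
  simp only [List.headD_cons, List.drop_zero, List.nil_append]
  rw [List.takeWhile_cons_of_pos (by simp), List.dropWhile_cons_of_pos (by simp)]
  rw [pvSpec]
  simp only [List.length_cons]
  rw [pvCsv_join]
  push_cast
  ring_nf
  simp
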